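-- pv_equiv track=rewrite | github.com/tbenedek92/adventofcode2022 | day1/part1.py | elf_max_calorie
-- ===== SOURCE A (Python) =====
-- def elf_max_calorie(elf_calorie_list):
--     elf_calorie = 0
--     max_elf_calorie = 0
--     for calorie in elf_calorie_list:
--         if calorie.isdigit():
--             elf_calorie += int(calorie)
--         else:
--             elf_calorie = 0
--
--         max_elf_calorie = max(elf_calorie, max_elf_calorie)
--
--     return max_elf_calorie
-- ===== SOURCE B (Python) =====
-- from itertools import groupby
--
--
-- def elf_max_calorie(elf_calorie_list):
--     totals = [sum(int(x) for x in group)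
--               for is_digit, group in groupby(elf_calorie_list, key=str.isdigit)
--               if is_digit]
--     return max(totals, default=0)
-- ===== Notes on version B (the rewrite author's own statement) =====
-- stated objective: alternative
-- what changed: Replaces A's single running-sum-with-reset-and-max loop by an itertools.groupby decomposition: consecutive digit-strings are grouped, each True-keyed group is summed, and the answer is max(totals, default=0).
import Mathlib
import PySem

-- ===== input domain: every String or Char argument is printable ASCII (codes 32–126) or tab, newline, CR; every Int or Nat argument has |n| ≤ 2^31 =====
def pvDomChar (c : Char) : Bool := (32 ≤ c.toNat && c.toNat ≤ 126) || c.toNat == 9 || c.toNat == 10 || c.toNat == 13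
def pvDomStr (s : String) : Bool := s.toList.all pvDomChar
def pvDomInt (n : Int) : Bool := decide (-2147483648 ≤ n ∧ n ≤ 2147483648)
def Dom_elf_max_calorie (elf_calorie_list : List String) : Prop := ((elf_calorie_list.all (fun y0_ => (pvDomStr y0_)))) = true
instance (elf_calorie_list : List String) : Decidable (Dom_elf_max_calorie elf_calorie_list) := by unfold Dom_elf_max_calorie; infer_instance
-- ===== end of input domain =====

-- B replaces A's running-sum-with-reset loop by an itertools.groupby decomposition:
-- sum each maximal run of digit strings, then take the max of the run totals (default 0).

-- int(x) on a digit string; the `getD 0` default is unreachable when the caller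
-- guards with isdigit (an all-digit ASCII string always parses).
def pvIntVal (s : String) : Int := (PySem.Int.ofStr? s).getD 0

-- ===== PORT A =====
def elf_max_calorie (elf_calorie_list : List String) : Int :=
  (elf_calorie_list.foldl
    (fun (st : Int × Int) calorie =>
      let elf := if PySem.Str.strIsdigit calorie then st.1 + pvIntVal calorie else 0
      (elf, max elf st.2))
    ((0 : Int), (0 : Int))).2

-- ===== PORT B =====
-- groupby(elf_calorie_list, key=str.isdigit): each maximal run of digit strings is a
-- group with key True; non-digit groups are skipped; each kept True-group is summed.
def pvGroupSums : List String → List Int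
  | [] => []
  | x :: xs =>
    if PySem.Str.strIsdigit x then
      ((x :: xs.takeWhile (fun s => PySem.Str.strIsdigit s)).map pvIntVal).sum
        :: pvGroupSums (xs.dropWhile (fun s => PySem.Str.strIsdigit s))
    else pvGroupSums xs
  termination_by l => l.length
  decreasing_by
  · exact Nat.lt_succ_of_le (xs.length_dropWhile_le _)
  · simp

-- max(totals, default=0)
def elf_max_calorie_alt (elf_calorie_list : List String) : Int :=
  match PySem.List.max? (pvGroupSums elf_calorie_list) (fun y => y) with
  | none => 0
  | some m => m

-- ===== PRECONDITION & SPEC =====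
def Spec_elf_max_calorie (elf_calorie_list : List String) (out : Int) : Prop := out = elf_max_calorie_alt elf_calorie_list
instance (elf_calorie_list : List String) (out : Int) : Decidable (Spec_elf_max_calorie elf_calorie_list out) := by unfold Spec_elf_max_calorie; infer_instance

-- ===== CLAIM (what is proved, stated in full; the proofs are below) =====
def Claim_equal_elf_max_calorie : Prop := ∀ (elf_calorie_list : List String), Dom_elf_max_calorie elf_calorie_list → Spec_elf_max_calorie elf_calorie_list (elf_max_calorie elf_calorie_list)

-- ===== LEMMAS AND PROOFS =====

-- the successive values of A's `elf_calorie` accumulator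
def pvElfVals : Int → List String → List Int
  | _, [] => []
  | cur, x :: xs =>
    let e := if PySem.Str.strIsdigit x then cur + pvIntVal x else 0
    e :: pvElfVals e xs

theorem pvGroupSums_cons_pos (y : String) (t : List String)
    (h : PySem.Str.strIsdigit y = true) :
    pvGroupSums (y :: t)
      = ((y :: t.takeWhile (fun s => PySem.Str.strIsdigit s)).map pvIntVal).sum
          :: pvGroupSums (t.dropWhile (fun s => PySem.Str.strIsdigit s)) := by
  rw [pvGroupSums, if_pos h]

theorem pvGroupSums_cons_neg (y : String) (t : List String)
    (h : ¬ PySem.Str.strIsdigit y = true) :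
    pvGroupSums (y :: t) = pvGroupSums t := by
  rw [pvGroupSums, if_neg h]

theorem dw_self (p : Char → Bool) (cs : List Char) (h : ∀ c ∈ cs, p c = false) :
    cs.dropWhile p = cs := by
  cases cs with
  | nil => rfl
  | cons c r => rw [List.dropWhile_cons, h c (by simp)]; simp

theorem opt_nonneg (o : Option Nat) :
    0 ≤ (Option.map (fun n : Int => n) (do let a ← o; pure ((a:Int)))).getD 0 := by
  cases o <;> simp

theorem pvIntVal_nonneg (s : String) (h : PySem.Str.strIsdigit s = true) :
    0 ≤ pvIntVal s := by
  unfold pvIntVal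
  simp only [PySem.Str.strIsdigit, PySem.Chars.strIsdigit, Bool.and_eq_true, List.all_eq_true] at h
  obtain ⟨hne, hall⟩ := h
  have hns : ∀ c ∈ s.toList, PySem.Int.isIntSpace c = false := by
    intro c hc
    have hd := hall c hc
    simp only [PySem.Chars.isdigit, Bool.and_eq_true, decide_eq_true_eq] at hd
    simp only [PySem.Int.isIntSpace]
    simp only [Bool.or_eq_false_iff, decide_eq_false_iff_not]
    refine ⟨⟨⟨⟨⟨?_, ?_⟩, ?_⟩, ?_⟩, ?_⟩, ?_⟩ <;> rintro rfl <;> revert hd <;> decide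
  rw [PySem.Int.ofStr?, PySem.Int.ofChars?]
  rw [dw_self _ _ hns, dw_self _ _ (by intro c hc; exact hns c (List.mem_reverse.mp hc)),
    List.reverse_reverse]
  cases hcs : s.toList with
  | nil => simp [hcs] at hne
  | cons c r =>
      have hd := hall c (by rw [hcs]; simp)
      simp only [PySem.Chars.isdigit, Bool.and_eq_true, decide_eq_true_eq] at hd
      have hc1 : c ≠ '-' := by rintro rfl; revert hd; decide
      have hc2 : c ≠ '+' := by rintro rfl; revert hd; decide
      split
      · next ds heq => exact absurd (List.cons.injEq .. ▸ heq) (by simp [hc1])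
      · next ds heq => exact absurd (List.cons.injEq .. ▸ heq) (by simp [hc2])
      · next ds h1 h2 => exact opt_nonneg _

theorem sum_run_nonneg (xs : List String)
    (h : ∀ s ∈ xs, PySem.Str.strIsdigit s = true) :
    0 ≤ (xs.map pvIntVal).sum := by
  induction xs with
  | nil => simp
  | cons a t ih =>
      simp only [List.map_cons, List.sum_cons]
      have := pvIntVal_nonneg a (h a (by simp))
      have := ih (fun s hs => h s (List.mem_cons_of_mem _ hs))
      omega

theorem groupSums_nonneg (l : List String) : ∀ g ∈ pvGroupSums l, 0 ≤ g := by
  induction l using pvGroupSums.induct with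
  | case1 => simp [pvGroupSums]
  | case2 x xs hx ih =>
      rw [pvGroupSums_cons_pos x xs hx]
      intro g hg
      rcases List.mem_cons.mp hg with rfl | hg'
      · refine sum_run_nonneg _ ?_
        intro s hs
        rcases List.mem_cons.mp hs with rfl | hs'
        · exact hx
        · exact List.mem_takeWhile_imp hs'
      · exact ih g hg'
  | case3 x xs hx ih =>
      rw [pvGroupSums_cons_neg x xs hx]
      exact ih

theorem foldA (l : List String) : ∀ cur mx : Int,
    (l.foldl
      (fun (st : Int × Int) calorie =>
        let elf := if PySem.Str.strIsdigit calorie then st.1 + pvIntVal calorie else 0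
        (elf, max elf st.2)) (cur, mx)).2
    = (pvElfVals cur l).foldl max mx := by
  induction l with
  | nil => intro cur mx; rfl
  | cons x xs ih =>
      intro cur mx
      simp only [List.foldl_cons, pvElfVals]
      rw [ih]
      rw [max_comm]

theorem gUnfold (ys : List String) (m : Int) (hm : 0 ≤ m) :
    (pvGroupSums (ys.dropWhile (fun s => PySem.Str.strIsdigit s))).foldl max
      (max m (((ys.takeWhile (fun s => PySem.Str.strIsdigit s)).map pvIntVal).sum))
    = (pvGroupSums ys).foldl max m := by
  cases ys with
  | nil =>
      simp only [List.takeWhile_nil, List.dropWhile_nil, List.map_nil, List.sum_nil]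
      rw [pvGroupSums]
      simp only [List.foldl_nil]
      omega
  | cons y t =>
      by_cases hy : PySem.Str.strIsdigit y = true
      · rw [pvGroupSums_cons_pos y t hy]
        simp only [List.takeWhile_cons, List.dropWhile_cons, hy, if_true, List.foldl_cons]
      · rw [pvGroupSums_cons_neg y t hy]
        simp only [List.takeWhile_cons, List.dropWhile_cons, hy, if_false, List.map_nil,
          List.sum_nil, Bool.false_eq_true]
        rw [pvGroupSums_cons_neg y t hy]
        congr 1
        omega

theorem runL (xs : List String) : ∀ (m cur : Int), 0 ≤ cur → cur ≤ m →
    (pvElfVals cur xs).foldl max m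
    = (pvGroupSums (xs.dropWhile (fun s => PySem.Str.strIsdigit s))).foldl max
        (max m (cur + ((xs.takeWhile (fun s => PySem.Str.strIsdigit s)).map pvIntVal).sum)) := by
  induction xs with
  | nil =>
      intro m cur h0 hm
      simp only [List.takeWhile_nil, List.dropWhile_nil, List.map_nil, List.sum_nil]
      rw [pvGroupSums]
      simp only [pvElfVals, List.foldl_nil]
      omega
  | cons x t ih =>
      intro m cur h0 hm
      by_cases hx : PySem.Str.strIsdigit x = true
      · have hvx := pvIntVal_nonneg x hx
        have hrun : 0 ≤ ((t.takeWhile (fun s => PySem.Str.strIsdigit s)).map pvIntVal).sum :=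
          sum_run_nonneg _ (fun s hs => List.mem_takeWhile_imp hs)
        simp only [pvElfVals, hx, if_true, List.foldl_cons,
          List.takeWhile_cons, List.dropWhile_cons, List.map_cons, List.sum_cons]
        rw [ih (max m (cur + pvIntVal x)) (cur + pvIntVal x) (by omega) (le_max_right _ _)]
        congr 1
        omega
      · simp only [pvElfVals, hx, if_false, List.foldl_cons,
          List.takeWhile_cons, List.dropWhile_cons, List.map_nil, List.sum_nil,
          Bool.false_eq_true]
        have hm0 : max m (0 : Int) = m := by omega
        rw [hm0]
        rw [ih m 0 le_rfl (by omega)]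
        simp only [zero_add]
        rw [gUnfold t m (by omega)]
        rw [pvGroupSums_cons_neg x t hx]
        congr 1
        omega

theorem altEq (l : List String) :
    (pvGroupSums l).foldl max 0 = elf_max_calorie_alt l := by
  unfold elf_max_calorie_alt
  cases h : pvGroupSums l with
  | nil => simp [PySem.List.max?]
  | cons s t =>
      rw [PySem.List.max?_id_cons]
      have hs : 0 ≤ s := groupSums_nonneg l s (by rw [h]; simp)
      simp only [List.foldl_cons]
      congr 1
      omega

-- ===== VERDICT (by name: the statement is the Claim_ definition above) =====
theorem elf_max_calorie_spec : Claim_equal_elf_max_calorie := by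
  intro l _
  unfold Spec_elf_max_calorie elf_max_calorie
  rw [foldA, runL l 0 0 le_rfl le_rfl]
  simp only [zero_add]
  rw [gUnfold l 0 le_rfl]
  exact altEq l
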